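-- pv_equiv track=rewrite | github.com/jedwardsjunior/google-foo-bar | Level Four/Free the Bunny Prisoners.py | answer
-- ===== SOURCE A (Python) =====
-- import itertools
--
-- def answer(numBunnies, numRequired):
--     # Edge case: if numRequired is 0, just return a list of empty lists
--     if (numRequired == 0):
--         return [[] for i in range(numBunnies)]
--
--     # Set up data structures needed to calculate and hold the key distribution
--     bunnyRows = []
--     result = []
--     for bunnyId in range(numBunnies):
--         bunnyRows.append(bunnyId)
--         result.append([])
--
--     # Each key needs to be missing from (numRequired - 1) bunnies' lists
--     numTimesToRemoveKey = numRequired - 1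
--
--     # Figure out the distribution of keys by calculating all combinations of n choose k,
--     # where n = numBunnies available to us and k = numKeysToRemove
--     #
--     # Each element in keyDistribution will correspond to a key in the sorted
--     # list of keys from 0... n choose k (as this is the total number of keys that we will
--     # need to satisfy the distribution)
--     keyDistribution = [list(row) for row in itertools.combinations(bunnyRows, numTimesToRemoveKey)]
--     numKeys = len(keyDistribution)
--     for key in range(numKeys):
--         keyValue = numKeys - key - 1
--         for bunnyIndex in range(len(result)):
--             # keyDistribution keeps track of the rows that the current key is exempt
--             # from, so only if this bunny's index is not exempt should we add it to
--             # their list of keys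
--             if (bunnyIndex not in keyDistribution[key]):
--                 result[bunnyIndex].insert(0, keyValue)
--
--     return result
-- ===== SOURCE B (Python) =====
-- import itertools
--
-- def answer(numBunnies, numRequired):
--     # Enumerate HOLDER sets instead of exempt sets: key i goes to the bunnies in
--     # the i-th lexicographic combination of size numBunnies - numRequired + 1.
--     result = [[] for _ in range(numBunnies)]
--     holders = numBunnies - numRequired + 1
--     if holders >= 0:
--         for key, combo in enumerate(itertools.combinations(range(numBunnies), holders)):
--             for b in combo:
--                 result[b].append(key)
--     return result
-- ===== Notes on version B (the rewrite author's own statement) =====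
-- stated objective: alternative
-- what changed: B enumerates the lexicographic HOLDER combinations (size numBunnies-numRequired+1) and appends each key index directly to its holders' lists, instead of A's enumeration of exempt sets with a per-bunny membership test and reverse-numbered insert(0); the outputs coincide by the complement-reversal symmetry of lexicographic combinations.
import Mathlib
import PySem

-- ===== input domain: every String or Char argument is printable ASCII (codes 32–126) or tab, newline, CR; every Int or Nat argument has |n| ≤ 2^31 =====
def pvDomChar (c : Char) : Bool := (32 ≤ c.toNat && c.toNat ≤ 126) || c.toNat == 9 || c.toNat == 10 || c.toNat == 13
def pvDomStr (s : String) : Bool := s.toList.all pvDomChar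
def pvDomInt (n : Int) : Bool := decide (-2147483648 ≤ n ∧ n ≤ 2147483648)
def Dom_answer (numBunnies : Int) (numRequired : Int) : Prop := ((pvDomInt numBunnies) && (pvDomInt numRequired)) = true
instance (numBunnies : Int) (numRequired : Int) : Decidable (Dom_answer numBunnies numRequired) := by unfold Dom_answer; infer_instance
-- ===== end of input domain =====

-- B enumerates holder combinations and appends key indices forward, instead of A's exempt-set
-- enumeration with per-bunny membership tests and reverse-numbered front inserts (objective: alternative).


-- ===== PORT A =====
-- itertools.combinations(xs, r): the same list as PySem.List.combinations (lemma pvCombos_eq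
-- below), with CPython's immediate empty result when r exceeds the remaining length, so the
-- port evaluates in the same regime as the Python library call (used by both ports)
def pvCombos : List Int → Nat → List (List Int)
  | _, 0 => [[]]
  | [], _ + 1 => []
  | x :: t, r + 1 =>
      if t.length + 1 < r + 1 then []
      else (pvCombos t r).map (x :: ·) ++ pvCombos t (r + 1)

-- inner loop: 'for bunnyIndex in range(len(result)): if bunnyIndex not in ex: result[bunnyIndex].insert(0, v)'
-- (walks the rows carrying the running bunnyIndex; insert(0, v) = v :: row, PySem.List.insert_zero)
def answerInnerA (ex : List Int) (v : Int) : List (List Int) → Int → List (List Int)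
  | [], _ => []
  | row :: rest, b => (if ex.contains b then row else v :: row) :: answerInnerA ex v rest (b + 1)

-- outer loop: 'for key in range(numKeys): keyValue = numKeys - key - 1; …keyDistribution[key]…'
-- ported over enumerate keyDistribution (same key values, same elements)
def answerOuterA (numKeys : Int) : List (Int × List Int) → List (List Int) → List (List Int)
  | [], result => result
  | (key, ex) :: rest, result =>
      answerOuterA numKeys rest (answerInnerA ex (numKeys - key - 1) result 0)

def answer (numBunnies : Int) (numRequired : Int) : List (List Int) :=
  if numRequired = 0 then
    (PySem.List.pyRange 0 numBunnies 1).map (fun _ => ([] : List Int))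
  else
    -- the setup loop appends bunnyId to bunnyRows and [] to result for each bunnyId in range(numBunnies)
    let st := (PySem.List.pyRange 0 numBunnies 1).foldl
      (fun (st : List Int × List (List Int)) bunnyId => (st.1 ++ [bunnyId], st.2 ++ [[]])) ([], [])
    -- itertools.combinations raises ValueError for numRequired - 1 < 0: Pre_answer excludes
    -- numRequired < 0, so .toNat only clamps outside Pre_
    let keyDistribution := pvCombos st.1 (numRequired - 1).toNat
    answerOuterA (PySem.List.len keyDistribution) (PySem.List.enumerate keyDistribution 0) st.2

-- ===== PORT B =====
-- 'result[b].append(i)': walk down to index b (always nonnegative here) and append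
def altAppendAt : List (List Int) → Int → Int → List (List Int)
  | [], _, _ => []
  | row :: rest, b, i => if b = 0 then (row ++ [i]) :: rest else row :: altAppendAt rest (b - 1) i

def answer_alt (numBunnies : Int) (numRequired : Int) : List (List Int) :=
  let result := (PySem.List.pyRange 0 numBunnies 1).map (fun _ => ([] : List Int))
  let holders := numBunnies - numRequired + 1
  if 0 ≤ holders then
    (PySem.List.enumerate
        (pvCombos (PySem.List.pyRange 0 numBunnies 1) holders.toNat) 0).foldl
      (fun res ki => ki.2.foldl (fun res b => altAppendAt res b ki.1) res) result
  else result

-- ===== PRECONDITION & SPEC =====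
-- Pre_ excludes numRequired < 0, where A raises ValueError (itertools.combinations with negative r)
def Pre_answer (numBunnies : Int) (numRequired : Int) : Prop := 0 ≤ numRequired
instance (numBunnies : Int) (numRequired : Int) : Decidable (Pre_answer numBunnies numRequired) := by
  unfold Pre_answer; infer_instance
def pvWitness_answer : Int × Int := (4, 2)

def Spec_answer (numBunnies : Int) (numRequired : Int) (out : List (List Int)) : Prop :=
  out = answer_alt numBunnies numRequired
instance (numBunnies : Int) (numRequired : Int) (out : List (List Int)) :
    Decidable (Spec_answer numBunnies numRequired out) := by unfold Spec_answer; infer_instance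

-- ===== CLAIM (what is proved, stated in full; the proofs are below) =====
def Claim_equal_answer : Prop := ∀ (numBunnies : Int) (numRequired : Int),
  Dom_answer numBunnies numRequired → Pre_answer numBunnies numRequired →
  Spec_answer numBunnies numRequired (answer numBunnies numRequired)

-- ===== LEMMAS AND PROOFS =====

lemma pvCombos_eq : ∀ (xs : List Int) (r : Nat), pvCombos xs r = PySem.List.combinations xs r
  | _, 0 => by rw [pvCombos, PySem.List.combinations_zero]
  | [], r + 1 => by rw [pvCombos, PySem.List.combinations_nil_succ]
  | x :: t, r + 1 => by
      rw [pvCombos]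
      by_cases hlt : t.length + 1 < r + 1
      · rw [if_pos hlt,
          PySem.List.combinations_eq_nil_of_length_lt (x :: t) (by simpa using hlt)]
      · rw [if_neg hlt, PySem.List.combinations_cons_succ, pvCombos_eq t r,
          pvCombos_eq t (r + 1)]

def pvComp (xs c : List Int) : List Int := xs.filter (fun y => !c.contains y)

-- ---------- A-side characterization ----------
lemma length_innerA (ex : List Int) (v : Int) : ∀ (rows : List (List Int)) (b : Int),
    (answerInnerA ex v rows b).length = rows.length
  | [], _ => rfl
  | _ :: rest, b => by simp [answerInnerA, length_innerA ex v rest (b + 1)]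

lemma get_innerA (ex : List Int) (v : Int) : ∀ (rows : List (List Int)) (b : Int) (j : Nat),
    (answerInnerA ex v rows b)[j]? =
      (rows[j]?).map (fun row => if ex.contains (b + (j : Int)) then row else v :: row)
  | [], _, _ => by simp [answerInnerA]
  | row :: rest, b, 0 => by simp [answerInnerA]
  | row :: rest, b, j + 1 => by
      have := get_innerA ex v rest (b + 1) j
      simpa [answerInnerA, add_assoc, add_comm (1 : Int)] using this

lemma length_outerA (K : Int) : ∀ (es : List (Int × List Int)) (result : List (List Int)),
    (answerOuterA K es result).length = result.length
  | [], _ => rfl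
  | (key, ex) :: rest, result => by
      show (answerOuterA K rest (answerInnerA ex (K - key - 1) result 0)).length = _
      rw [length_outerA K rest, length_innerA]

lemma get_outerA (K : Int) : ∀ (es : List (Int × List Int)) (result : List (List Int)) (j : Nat),
    (answerOuterA K es result)[j]? =
      (result[j]?).map (fun row0 =>
        es.foldl (fun row ki => if ki.2.contains (j : Int) then row else (K - ki.1 - 1) :: row)
          row0)
  | [], result, j => by simp [answerOuterA]
  | (key, ex) :: rest, result, j => by
      show (answerOuterA K rest (answerInnerA ex (K - key - 1) result 0))[j]? = _
      rw [get_outerA K rest, get_innerA]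
      cases hres : result[j]? <;> simp

-- row fold of A, closed form
lemma foldl_cons_if_closed (p : List Int → Bool) (f : Int → Int) :
    ∀ (l : List (Int × List Int)) (init : List Int),
    l.foldl (fun acc ki => if p ki.2 then acc else f ki.1 :: acc) init
      = ((l.filter (fun ki => !p ki.2)).map (fun ki => f ki.1)).reverse ++ init
  | [], init => rfl
  | ki :: rest, init => by
      rw [List.foldl_cons, foldl_cons_if_closed p f rest]
      by_cases hp : p ki.2 <;> simp [hp]

-- ---------- B-side characterization ----------
lemma length_appendAt : ∀ (rows : List (List Int)) (b i : Int),
    (altAppendAt rows b i).length = rows.length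
  | [], _, _ => rfl
  | row :: rest, b, i => by
      rw [altAppendAt]
      by_cases hb : b = 0 <;> simp [hb, length_appendAt rest]

lemma get_appendAt : ∀ (rows : List (List Int)) (b i : Int) (j : Nat), 0 ≤ b →
    (altAppendAt rows b i)[j]? =
      (rows[j]?).map (fun row => if (j : Int) = b then row ++ [i] else row)
  | [], b, i, j, _ => by simp [altAppendAt]
  | row :: rest, b, i, 0, hb0 => by
      by_cases hb : b = 0
      · simp [altAppendAt, hb]
      · have h0 : ¬((0 : Int) = b) := by omega
        simp [altAppendAt, hb, h0]
  | row :: rest, b, i, j + 1, hb0 => by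
      by_cases hb : b = 0
      · subst hb
        have h0 : ¬((j : Int) + 1 = 0) := by omega
        simp [altAppendAt, h0]
      · simp only [altAppendAt, if_neg hb, List.getElem?_cons_succ]
        rw [get_appendAt rest (b - 1) i j (by omega)]
        cases rest[j]? with
        | none => simp
        | some row =>
            simp only [Option.map_some]
            by_cases hc : (j : Int) = b - 1
            · rw [if_pos hc, if_pos (by push_cast; omega)]
            · rw [if_neg hc, if_neg (by push_cast; omega)]

lemma length_foldCombo (i : Int) : ∀ (combo : List Int) (res : List (List Int)),
    (combo.foldl (fun res b => altAppendAt res b i) res).length = res.length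
  | [], _ => rfl
  | b :: rest, res => by
      rw [List.foldl_cons, length_foldCombo i rest, length_appendAt]

lemma get_foldCombo (i : Int) : ∀ (combo : List Int) (res : List (List Int)) (j : Nat),
    combo.Nodup → (∀ b ∈ combo, 0 ≤ b) →
    (combo.foldl (fun res b => altAppendAt res b i) res)[j]? =
      (res[j]?).map (fun row => if combo.contains (j : Int) then row ++ [i] else row)
  | [], res, j, _, _ => by simp
  | b :: rest, res, j, hnd, hnn => by
      rw [List.foldl_cons,
        get_foldCombo i rest (altAppendAt res b i) j hnd.of_cons
          (fun x hx => hnn x (List.mem_cons_of_mem _ hx)),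
        get_appendAt res b i j (hnn b List.mem_cons_self)]
      by_cases hjb : (j : Int) = b
      · have hbr : b ∉ rest := (List.nodup_cons.mp hnd).1
        cases hres : res[j]? <;> simp [hjb, hbr]
      · cases hres : res[j]? <;> simp [hjb]

lemma length_outerB : ∀ (es : List (Int × List Int)) (result : List (List Int)),
    (es.foldl (fun res ki => ki.2.foldl (fun res b => altAppendAt res b ki.1) res) result).length
      = result.length
  | [], _ => rfl
  | ki :: rest, result => by
      rw [List.foldl_cons, length_outerB rest, length_foldCombo]

lemma get_outerB : ∀ (es : List (Int × List Int)) (result : List (List Int)) (j : Nat),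
    (∀ ki ∈ es, ki.2.Nodup ∧ ∀ b ∈ ki.2, 0 ≤ b) →
    (es.foldl (fun res ki => ki.2.foldl (fun res b => altAppendAt res b ki.1) res) result)[j]? =
      (result[j]?).map (fun row0 =>
        es.foldl (fun row ki => if ki.2.contains (j : Int) then row ++ [ki.1] else row) row0)
  | [], result, j, _ => by simp
  | ki :: rest, result, j, hall => by
      rw [List.foldl_cons,
        get_outerB rest _ j (fun x hx => hall x (List.mem_cons_of_mem _ hx)),
        get_foldCombo ki.1 ki.2 result j (hall ki List.mem_cons_self).1
          (hall ki List.mem_cons_self).2]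
      cases hres : result[j]? <;> simp

-- ---------- complement facts ----------
lemma comp_nil (xs : List Int) : pvComp xs [] = xs := by simp [pvComp]

lemma comp_self (t : List Int) : pvComp t t = [] := by
  rw [pvComp, List.filter_eq_nil_iff]
  intro a ha; simp [ha]

lemma comp_cons_mem (x : Int) (t c : List Int) (hx : x ∉ t) :
    pvComp (x :: t) (x :: c) = pvComp t c := by
  rw [pvComp, pvComp, List.filter_cons_of_neg (by simp)]
  apply List.filter_congr
  intro y hy
  have hne : y ≠ x := fun h => hx (h ▸ hy)
  simp [hne]

lemma comp_cons_not_mem (x : Int) (t c : List Int) (hc : x ∉ c) :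
    pvComp (x :: t) c = x :: pvComp t c := by
  rw [pvComp, List.filter_cons_of_pos (by simp [hc])]; rfl

-- complement-reversal symmetry of lexicographic combinations on a duplicate-free list
lemma combos_comp_reverse : ∀ (xs : List Int), xs.Nodup → ∀ (k : Nat), k ≤ xs.length →
    (PySem.List.combinations xs k).map (pvComp xs)
      = (PySem.List.combinations xs (xs.length - k)).reverse
  | [], _, 0, _ => by simp [PySem.List.combinations_zero, comp_nil]
  | [], _, k + 1, h => absurd h (by simp)
  | x :: t, hnd, 0, _ => by
      rw [PySem.List.combinations_zero, Nat.sub_zero, PySem.List.combinations_length_self]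
      simp [comp_nil]
  | x :: t, hnd, k + 1, h => by
      have hx : x ∉ t := (List.nodup_cons.mp hnd).1
      have hndt : t.Nodup := (List.nodup_cons.mp hnd).2
      rw [PySem.List.combinations_cons_succ, List.map_append, List.map_map]
      have h1 : (PySem.List.combinations t k).map (pvComp (x :: t) ∘ (x :: ·))
          = (PySem.List.combinations t k).map (pvComp t) :=
        List.map_congr_left (fun c _ => comp_cons_mem x t c hx)
      have h2 : (PySem.List.combinations t (k + 1)).map (pvComp (x :: t))
          = ((PySem.List.combinations t (k + 1)).map (pvComp t)).map (x :: ·) := by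
        rw [List.map_map]
        refine List.map_congr_left (fun c hc => ?_)
        exact comp_cons_not_mem x t c
          (fun hxc => hx ((PySem.List.sublist_of_mem_combinations hc).subset hxc))
      rw [h1, h2]
      by_cases hk : k + 1 ≤ t.length
      · rw [combos_comp_reverse t hndt k (Nat.le_of_succ_le hk),
          combos_comp_reverse t hndt (k + 1) hk]
        have hm : (x :: t).length - (k + 1) = (t.length - (k + 1)) + 1 := by
          simp only [List.length_cons]; omega
        have harg : t.length - k = t.length - (k + 1) + 1 := by omega
        rw [hm, PySem.List.combinations_cons_succ, List.reverse_append, harg,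
          List.map_reverse]
      · have h' : k + 1 ≤ t.length + 1 := by simpa using h
        have hk' : k = t.length := by omega
        subst hk'
        have hlt : t.length < t.length + 1 := by omega
        rw [PySem.List.combinations_length_self,
          PySem.List.combinations_eq_nil_of_length_lt t hlt]
        have hz : (x :: t).length - (t.length + 1) = 0 := by simp
        rw [hz, PySem.List.combinations_zero]
        simp [comp_self]

-- reversing and re-indexing a filtered range
lemma reindex_range (p : Nat → Bool) : ∀ (K : Nat),
    (((List.range K).filter p).map (fun t => K - 1 - t)).reverse
      = (List.range K).filter (fun t => p (K - 1 - t))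
  | 0 => rfl
  | K + 1 => by
      have IH := reindex_range p K
      have e1 : (List.range K).filter ((fun t => p (K + 1 - 1 - t)) ∘ Nat.succ)
          = (List.range K).filter (fun t => p (K - 1 - t)) := by
        apply List.filter_congr
        intro t _
        simp only [Function.comp_apply]
        congr 1
        omega
      have e2 : ((List.range K).filter p).map (fun t => K + 1 - 1 - t)
          = (((List.range K).filter p).map (fun t => K - 1 - t)).map Nat.succ := by
        rw [List.map_map]
        apply List.map_congr_left
        intro t ht
        have htK : t < K := List.mem_range.mp (List.mem_filter.mp ht).1
        simp [Function.comp]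
        omega
      have h0 : K + 1 - 1 - K = 0 := by omega
      conv_lhs => rw [List.range_succ]
      conv_rhs => rw [List.range_succ_eq_map]
      rw [List.filter_append, List.map_append, List.reverse_append, e2]
      conv_rhs => rw [List.filter_cons, List.filter_map]
      rw [e1, ← IH, ← List.map_reverse]
      by_cases hpK : p K <;> simp [hpK]

lemma contains_comp (xs c : List Int) (j : Int) :
    (pvComp xs c).contains j = (xs.contains j && !c.contains j) := by
  by_cases h1 : j ∈ xs <;> by_cases h2 : j ∈ c <;> simp [pvComp, h1, h2]

lemma enum_eq_range (F : List (List Int)) :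
    PySem.List.enumerate F
      = (List.range F.length).map (fun t : Nat => ((t : Int), F.getD t [])) := by
  rw [PySem.List.enumerate_eq_map_pyRange F [], PySem.List.pyRange_one, List.map_map]
  simp only [PySem.List.len_eq, Int.sub_zero, Int.toNat_natCast]
  apply List.map_congr_left
  intro t _
  simp [PySem.List.pyGetD_natCast]

-- per-bunny row equality: A's reverse-numbered exempt filter = B's forward holder filter
lemma row_eq (E : List (List Int)) (xs : List Int) (j : Int) (hj : xs.contains j = true) :
    (((PySem.List.enumerate E).filter (fun ki => !ki.2.contains j)).map
        (fun ki => PySem.List.len E - ki.1 - 1)).reverse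
      = ((PySem.List.enumerate ((E.map (pvComp xs)).reverse)).filter
          (fun ki => ki.2.contains j)).map (fun ki => ki.1) := by
  set K := E.length with hK
  have hlenH : ((E.map (pvComp xs)).reverse).length = K := by simp [hK]
  rw [enum_eq_range, enum_eq_range, hlenH, List.filter_map, List.filter_map,
    List.map_map, List.map_map]
  have hcond : ((fun ki : Int × List Int => ki.2.contains j) ∘
        (fun t : Nat => ((t : Int), ((E.map (pvComp xs)).reverse).getD t [])))
      = fun t : Nat => ((E.map (pvComp xs)).reverse.getD t []).contains j := rfl
  have hgetH : ∀ t ∈ List.range K,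
      (((E.map (pvComp xs)).reverse.getD t []).contains j)
        = !(E.getD (K - 1 - t) []).contains j := by
    intro t ht
    have htK : t < K := List.mem_range.mp ht
    rw [List.getD_eq_getElem _ _ (by simpa [hlenH] using htK), List.getElem_reverse]
    simp only [List.length_map, List.getElem_map]
    rw [contains_comp, hj, Bool.true_and,
      List.getD_eq_getElem E ([] : List Int) (by omega : K - 1 - t < E.length)]
  rw [hcond, List.filter_congr hgetH]
  simp only [Function.comp_def]
  have hre := congrArg (List.map (fun t : Nat => (t : Int)))
    (reindex_range (fun t => !(E.getD t []).contains j) K)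
  rw [← hre, List.map_reverse, List.map_map]
  congr 1
  apply List.map_congr_left
  intro t ht
  have htK : t < K := List.mem_range.mp (List.mem_filter.mp ht).1
  simp only [Function.comp_def, PySem.List.len_eq]
  omega

lemma outerA_nil (K : Int) (es : List (Int × List Int)) : answerOuterA K es [] = [] :=
  List.eq_nil_of_length_eq_zero (length_outerA K es [])

lemma setup_foldl (l : List Int) :
    l.foldl (fun (st : List Int × List (List Int)) bunnyId =>
      (st.1 ++ [bunnyId], st.2 ++ [[]])) ([], [])
      = (l, l.map (fun _ => [])) := by
  rw [PySem.List.foldl_prod_mk (fun (a : List Int) (b : Int) => a ++ [b])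
    (fun (a : List (List Int)) (_ : Int) => a ++ [([] : List Int)])]
  rw [PySem.List.foldl_append_singleton_eq_self,
    PySem.List.foldl_append_singleton_eq_map (fun _ : Int => ([] : List Int))]
  simp

lemma answer_eq_alt (n r : Int) (hr0 : 0 ≤ r) : answer n r = answer_alt n r := by
  by_cases hr : r = 0
  · subst hr
    by_cases hh : (0 : Int) ≤ n - 0 + 1
    · by_cases hn : 0 ≤ n
      · simp only [answer, answer_alt, if_true, if_pos hh, pvCombos_eq]
        rw [PySem.List.combinations_eq_nil_of_length_lt (PySem.List.pyRange 0 n 1)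
          (show (PySem.List.pyRange 0 n 1).length < (n - 0 + 1).toNat by
            rw [PySem.List.length_pyRange_one]; omega)]
        rfl
      · have hn1 : n = -1 := by omega
        subst hn1; decide
    · simp only [answer, answer_alt, if_true, if_neg hh]
  · -- numRequired ≥ 1
    have hr1 : 1 ≤ r := by omega
    by_cases hn : n ≤ 0
    · -- no bunnies: both sides are []
      have hxs : PySem.List.pyRange 0 n 1 = [] := PySem.List.pyRange_one_eq_nil hn
      simp only [answer, answer_alt, if_neg hr, hxs, setup_foldl, List.map_nil, pvCombos_eq]
      rw [outerA_nil]
      by_cases hh : (0 : Int) ≤ n - r + 1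
      · rw [if_pos hh]
        exact (List.eq_nil_of_length_eq_zero (by
          simpa using length_outerB (PySem.List.enumerate
            (PySem.List.combinations ([] : List Int) (n - r + 1).toNat) 0) [])).symm
      · rw [if_neg hh]
    · -- at least one bunny
      have hn1 : 0 < n := by omega
      simp only [answer, answer_alt, if_neg hr, setup_foldl, pvCombos_eq]
      set xs := PySem.List.pyRange 0 n 1 with hxsdef
      have hN : xs.length = n.toNat := by
        rw [hxsdef, PySem.List.length_pyRange_one]; omega
      have hnodup : xs.Nodup := PySem.List.nodup_pyRange_one 0 n
      by_cases hbig : xs.length < (r - 1).toNat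
      · -- more removals than bunnies: no keys on either side
        rw [PySem.List.combinations_eq_nil_of_length_lt xs hbig,
          if_neg (show ¬ (0 : Int) ≤ n - r + 1 by rw [hN] at hbig; omega)]
        rfl
      · have hk : (r - 1).toNat ≤ xs.length := by omega
        have hh : (0 : Int) ≤ n - r + 1 := by rw [hN] at hk; omega
        have htoNat : (n - r + 1).toNat = xs.length - (r - 1).toNat := by
          rw [hN]; omega
        have hsym := congrArg List.reverse (combos_comp_reverse xs hnodup (r - 1).toNat hk)
        rw [List.reverse_reverse] at hsym
        have hH : PySem.List.combinations xs (n - r + 1).toNat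
            = ((PySem.List.combinations xs (r - 1).toNat).map (pvComp xs)).reverse := by
          rw [htoNat, ← hsym]
        rw [if_pos hh, hH]
        set E := PySem.List.combinations xs (r - 1).toNat with hEdef
        have hall : ∀ ki ∈ PySem.List.enumerate ((E.map (pvComp xs)).reverse) 0,
            ki.2.Nodup ∧ ∀ b ∈ ki.2, 0 ≤ b := by
          intro ki hki
          rcases (PySem.List.mem_enumerate_iff _ _ _).mp hki with ⟨t, ht, hkieq⟩
          have h2 : ki.2 ∈ (E.map (pvComp xs)).reverse := by
            rw [hkieq]; exact List.getElem_mem ht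
          rcases List.mem_map.mp (List.mem_reverse.mp h2) with ⟨c, _, hceq⟩
          rw [← hceq]
          constructor
          · exact (List.filter_sublist (l := xs)).nodup hnodup
          · intro b hb
            have hbxs : b ∈ xs := (List.filter_sublist (l := xs)).subset hb
            rw [hxsdef] at hbxs
            exact (PySem.List.mem_pyRange_one.mp hbxs).1
        apply List.ext_getElem?
        intro i
        rw [get_outerA, get_outerB _ _ _ hall, List.getElem?_map]
        cases hx : xs[i]? with
        | none => rfl
        | some v =>
            obtain ⟨hiN, -⟩ := List.getElem?_eq_some_iff.mp hx
            have hji : xs.contains (i : Int) = true := by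
              have hmem : (i : Int) ∈ xs := by
                rw [hxsdef, PySem.List.mem_pyRange_one]
                constructor
                · omega
                · rw [hN] at hiN; omega
              simpa using hmem
            simp only [Option.map_some]
            congr 1
            rw [foldl_cons_if_closed (fun c => c.contains (i : Int))
              (fun key => PySem.List.len E - key - 1),
              PySem.List.foldl_append_if (fun ki : Int × List Int => ki.2.contains (i : Int))
                (fun ki => ki.1)]
            rw [List.append_nil, List.nil_append]
            exact row_eq E xs (i : Int) hji

-- ===== VERDICT (by name: the statement is the Claim_ definition above) =====
theorem answer_spec : Claim_equal_answer := by
  intro n r _ hpre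
  unfold Spec_answer
  exact answer_eq_alt n r hpre
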